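-- pv_equiv track=rewrite | github.com/learicard/coursework | ift2125/code/bt_queens.py | roll_right
-- ===== SOURCE A (Python) =====
-- def roll_right(deg):
--     # right to left
--     for i in range(len(deg)-1, -1, -1):
--         if deg[i] == 1:
--
--             # edge of board, just remove
--             if i == len(deg)-1:
--                 deg[i] = 0
--             # shift threat to right
--             else:
--                 deg[i+1] = 1
--                 deg[i] = 0
--
--     return(deg)
-- ===== SOURCE B (Python) =====
-- def roll_right(deg):
--     # Forward single pass: new[i] is 1 if the original previous cell was 1,
--     # else 0 if the original cell was 1, else unchanged.
--     prev = False
--     res = []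
--     for x in deg:
--         res.append(1 if prev else (0 if x == 1 else x))
--         prev = (x == 1)
--     deg[:] = res
--     return deg
-- ===== Notes on version B (the rewrite author's own statement) =====
-- stated objective: simpler
-- what changed: Replaced A's right-to-left in-place look-ahead loop (writing to i and i+1) with a forward single pass carrying a one-bit 'previous cell was 1' flag and building the result list, then assigning it back in place.
import Mathlib
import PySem

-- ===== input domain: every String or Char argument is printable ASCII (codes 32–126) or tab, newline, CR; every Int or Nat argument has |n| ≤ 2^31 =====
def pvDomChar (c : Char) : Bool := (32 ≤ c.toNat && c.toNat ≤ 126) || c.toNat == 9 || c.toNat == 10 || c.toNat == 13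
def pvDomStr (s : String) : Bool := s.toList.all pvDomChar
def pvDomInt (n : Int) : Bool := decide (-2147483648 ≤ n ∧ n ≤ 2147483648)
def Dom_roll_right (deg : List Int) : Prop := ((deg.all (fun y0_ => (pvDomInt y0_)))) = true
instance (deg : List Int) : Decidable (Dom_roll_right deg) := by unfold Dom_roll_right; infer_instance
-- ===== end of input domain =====

-- B replaces A's right-to-left in-place look-ahead loop by a forward single pass
-- carrying a 'previous cell was 1' flag (objective: simpler). A mutates its argument
-- in place; B performs the same mutation (deg[:] = res); the equivalence proved here
-- is about the return value.

-- ===== PORT A =====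
-- loop body of A's 'for i in range(len(deg)-1, -1, -1)'
def rollStep (d : List Int) (i : Int) : List Int :=
  if PySem.List.pyGetD d i 0 = 1 then
    if i = (d.length : Int) - 1 then
      PySem.List.pySetD d i 0
    else
      PySem.List.pySetD (PySem.List.pySetD d (i + 1) 1) i 0
  else d

def roll_right (deg : List Int) : List Int :=
  (PySem.List.pyRange ((deg.length : Int) - 1) (-1) (-1)).foldl rollStep deg

-- ===== PORT B =====
-- B's forward pass building res with the 'prev' flag
def rollRightGo (prev : Bool) : List Int → List Int
  | [] => []
  | x :: xs => (if prev then 1 else if x = 1 then 0 else x) :: rollRightGo (x = 1) xs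

def roll_right_alt (deg : List Int) : List Int := rollRightGo false deg

-- ===== PRECONDITION & SPEC =====
def Spec_roll_right (deg : List Int) (out : List Int) : Prop := out = roll_right_alt deg
instance (deg : List Int) (out : List Int) : Decidable (Spec_roll_right deg out) := by unfold Spec_roll_right; infer_instance

-- ===== CLAIM (what is proved, stated in full; the proofs are below) =====
def Claim_equal_roll_right : Prop := ∀ (deg : List Int), Dom_roll_right deg → Spec_roll_right deg (roll_right deg)

-- ===== LEMMAS AND PROOFS =====

-- rollStep at an index ≥ 1 leaves the head alone and acts on the tail at i-1
theorem rollStep_cons (x : Int) (d : List Int) (i : Int) (hi : 1 ≤ i) :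
    rollStep (x :: d) i = x :: rollStep d (i - 1) := by
  have h0 : (0:Int) ≤ i := by omega
  have h0' : (0:Int) ≤ i - 1 := by omega
  have hnat : i.toNat = (i - 1).toNat + 1 := by omega
  have hget : PySem.List.pyGetD (x :: d) i 0 = PySem.List.pyGetD d (i - 1) 0 := by
    rw [PySem.List.pyGetD_of_nonneg _ _ h0, PySem.List.pyGetD_of_nonneg _ _ h0', hnat]
    rfl
  have hlen : (i = ((x :: d).length : Int) - 1) ↔ (i - 1 = (d.length : Int) - 1) := by
    simp
  have hcons : ∀ (e : List Int) (v : Int),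
      PySem.List.pySetD (x :: e) i v = x :: PySem.List.pySetD e (i - 1) v := by
    intro e v
    rw [PySem.List.pySetD_of_nonneg _ _ h0, PySem.List.pySetD_of_nonneg _ _ h0', hnat]
    rfl
  have hcons1 : ∀ (e : List Int) (v : Int),
      PySem.List.pySetD (x :: e) (i + 1) v = x :: PySem.List.pySetD e i v := by
    intro e v
    have h1 : (0:Int) ≤ i + 1 := by omega
    have h2 : (i + 1).toNat = i.toNat + 1 := by omega
    rw [PySem.List.pySetD_of_nonneg _ _ h1, PySem.List.pySetD_of_nonneg _ _ h0, h2]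
    rfl
  unfold rollStep
  rw [hget]
  by_cases hv : PySem.List.pyGetD d (i - 1) 0 = 1
  · rw [if_pos hv, if_pos hv]
    by_cases he : i - 1 = (d.length : Int) - 1
    · rw [if_pos (hlen.mpr he), if_pos he, hcons d 0]
    · rw [if_neg (fun h => he (hlen.mp h)), if_neg he, hcons1 d 1,
          hcons (PySem.List.pySetD d i 1) 0,
          show i - 1 + 1 = i from by omega]
  · rw [if_neg hv, if_neg hv]

-- folding rollStep over indices all ≥ 1 over a cons just shifts the indices down on the tail
theorem foldl_rollStep_cons (x : Int) (xs : List Int) (l : List Int)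
    (hl : ∀ i ∈ l, (1:Int) ≤ i) :
    List.foldl rollStep (x :: xs) l = x :: List.foldl rollStep xs (l.map (· - 1)) := by
  induction l generalizing xs with
  | nil => simp
  | cons a t ih =>
    simp only [List.foldl_cons, List.map_cons]
    rw [rollStep_cons x xs a (hl a (by simp)), ih _ (fun i hi => hl i (by simp [hi]))]

theorem rollRightGo_set_head (xs : List Int) (h : xs ≠ []) :
    (rollRightGo false xs).set 0 1 = rollRightGo true xs := by
  cases xs with
  | nil => exact absurd rfl h
  | cons y ys => simp [rollRightGo]

theorem rollRightGo_length (b : Bool) (xs : List Int) :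
    (rollRightGo b xs).length = xs.length := by
  induction xs generalizing b with
  | nil => rfl
  | cons y ys ih => simp [rollRightGo, ih]

-- the countdown index list for a cons: split off the final index 0 and shift
theorem pyRange_countdown_split (n : ℕ) :
    PySem.List.pyRange (n : Int) (-1) (-1) =
      PySem.List.pyRange (n : Int) 0 (-1) ++ [0] := by
  rw [PySem.List.pyRange_neg_one, PySem.List.pyRange_neg_one]
  have h1 : ((n : Int) - (-1)).toNat = n + 1 := by omega
  have h2 : ((n : Int) - 0).toNat = n := by omega
  rw [h1, h2, List.range_succ]
  simp

theorem pyRange_countdown_map_sub (n : ℕ) :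
    (PySem.List.pyRange (n : Int) 0 (-1)).map (· - 1) =
      PySem.List.pyRange ((n : Int) - 1) (-1) (-1) := by
  rw [PySem.List.pyRange_neg_one, PySem.List.pyRange_neg_one]
  have h2 : ((n : Int) - 0).toNat = n := by omega
  have h3 : ((n : Int) - 1 - (-1)).toNat = n := by omega
  rw [h2, h3, List.map_map]
  apply List.map_congr_left
  intro k _; simp; ring

theorem key (xs : List Int) :
    List.foldl rollStep xs (PySem.List.pyRange ((xs.length : Int) - 1) (-1) (-1)) =
      rollRightGo false xs := by
  induction xs with
  | nil =>
    rw [PySem.List.pyRange_neg_one_eq_nil (by norm_num)]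
    rfl
  | cons x xs ih =>
    have hlen : ((x :: xs).length : Int) - 1 = (xs.length : Int) := by simp
    rw [hlen, pyRange_countdown_split xs.length, List.foldl_append,
        foldl_rollStep_cons x xs _ (fun i hi => by
          have := (PySem.List.mem_pyRange_neg_one).mp hi
          omega),
        pyRange_countdown_map_sub xs.length, ih]
    -- now compute rollStep (x :: rollRightGo false xs) 0
    simp only [List.foldl_cons, List.foldl_nil]
    unfold rollStep
    by_cases hx : x = 1
    · subst hx
      simp only [PySem.List.pyGetD_zero_cons]
      by_cases hnil : xs = []
      · subst hnil
        norm_num [rollRightGo, PySem.List.pySetD_of_nonneg]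
      · have hpos : 0 < xs.length := List.length_pos_of_ne_nil hnil
        rw [if_pos trivial,
            if_neg (by simp only [List.length_cons, rollRightGo_length]; push_cast; omega),
            show (0:Int) + 1 = 1 from rfl,
            PySem.List.pySetD_of_nonneg _ _ (by norm_num : (0:Int) ≤ 1)]
        simp only [Int.toNat_one, List.set_cons_succ]
        rw [rollRightGo_set_head xs hnil,
            PySem.List.pySetD_of_nonneg _ _ (le_refl (0:Int))]
        simp [rollRightGo]
    · simp [hx, rollRightGo]

-- ===== VERDICT (by name: the statement is the Claim_ definition above) =====
theorem roll_right_spec : Claim_equal_roll_right := by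
  intro deg _
  unfold Spec_roll_right roll_right roll_right_alt
  exact key deg
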